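-- pv_equiv track=rewrite | github.com/pypi-data/pypi-mirror-350 | packages/allianceauth/allianceauth-5.0.0a3.tar.gz/allianceauth-5.0.0a3/allianceauth/services/modules/openfire/manager.py | __sanitize_username
-- ===== SOURCE A (Python) =====
-- def __sanitize_username(username):
--     # https://xmpp.org/extensions/xep-0106.html#escaping
--     replace = [
--         ("\\", "\\5c"),  # Escape backslashes first to double escape existing escape sequences
--         ("\"", "\\22"),
--         ("&", "\\26"),
--         ("'", "\\27"),
--         ("/", "\\2f"),
--         (":", "\\3a"),
--         ("<", "\\3c"),
--         (">", "\\3e"),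
--         ("@", "\\40"),
--         ("\u007F", ""),
--         ("\uFFFE", ""),
--         ("\uFFFF", ""),
--         (" ", "\\20"),
--     ]
--
--     sanitized = username.strip(' ')
--
--     for find, rep in replace:
--         sanitized = sanitized.replace(find, rep)
--
--     return sanitized
-- ===== SOURCE B (Python) =====
-- _XEP0106_TABLE = str.maketrans({
--     "\\": "\\5c",
--     "\"": "\\22",
--     "&": "\\26",
--     "'": "\\27",
--     "/": "\\2f",
--     ":": "\\3a",
--     "<": "\\3c",
--     ">": "\\3e",
--     "@": "\\40",
--     " ": "\\20",
--     "\u007F": None,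
--     "\uFFFE": None,
--     "\uFFFF": None,
-- })
--
--
-- def __sanitize_username(username):
--     # One table-driven pass instead of 13 sequential full-string scans.
--     # Exact: no escape output character is itself a replacement target.
--     return username.strip(' ').translate(_XEP0106_TABLE)
-- ===== Notes on version B (the rewrite author's own statement) =====
-- stated objective: idiomatic
-- what changed: Replaces the 13 sequential full-string .replace() scans with a single character-by-character str.translate pass over one precomputed table (deletions mapped to None).
import Mathlib
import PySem

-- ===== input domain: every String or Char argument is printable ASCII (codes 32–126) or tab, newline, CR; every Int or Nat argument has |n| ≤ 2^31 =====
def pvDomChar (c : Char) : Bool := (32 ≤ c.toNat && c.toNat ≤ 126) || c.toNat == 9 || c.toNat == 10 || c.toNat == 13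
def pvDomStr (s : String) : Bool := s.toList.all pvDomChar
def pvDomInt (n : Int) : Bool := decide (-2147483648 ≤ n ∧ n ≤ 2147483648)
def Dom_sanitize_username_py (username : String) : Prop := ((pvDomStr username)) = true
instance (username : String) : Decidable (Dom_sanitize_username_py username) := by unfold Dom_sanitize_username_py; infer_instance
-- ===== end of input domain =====

-- B replaces A's 13 sequential full-string replace scans with one table-driven
-- character-by-character pass (objective: idiomatic single-pass translate).

-- ===== PORT A =====
-- the literal replacement list of __sanitize_username
def pvReplaceListA : List (String × String) :=
  [("\\", "\\5c"), ("\"", "\\22"), ("&", "\\26"), ("'", "\\27"), ("/", "\\2f"),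
   (":", "\\3a"), ("<", "\\3c"), (">", "\\3e"), ("@", "\\40"),
   ("\u007F", ""), ("\uFFFE", ""), ("\uFFFF", ""), (" ", "\\20")]

def sanitize_username_py (username : String) : String :=
  pvReplaceListA.foldl (fun sanitized p => PySem.Str.replace sanitized p.1 p.2)
    (PySem.Str.stripChars username " ")

-- ===== PORT B =====
-- the translation table of Source B as a per-character lookup (None = deletion = [])
def pvEscTable (c : Char) : List Char :=
  if c = '\\' then "\\5c".toList
  else if c = '"' then "\\22".toList
  else if c = '&' then "\\26".toList
  else if c = '\'' then "\\27".toList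
  else if c = '/' then "\\2f".toList
  else if c = ':' then "\\3a".toList
  else if c = '<' then "\\3c".toList
  else if c = '>' then "\\3e".toList
  else if c = '@' then "\\40".toList
  else if c = ' ' then "\\20".toList
  else if c = '\u007F' then []
  else if c = '\uFFFE' then []
  else if c = '\uFFFF' then []
  else [c]

def sanitize_username_py_alt (username : String) : String :=
  String.ofList ((PySem.Str.stripChars username " ").toList.flatMap pvEscTable)

-- ===== PRECONDITION & SPEC =====
def Spec_sanitize_username_py (username : String) (out : String) : Prop := out = sanitize_username_py_alt username
instance (username : String) (out : String) : Decidable (Spec_sanitize_username_py username out) := by unfold Spec_sanitize_username_py; infer_instance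

-- ===== CLAIM (what is proved, stated in full; the proofs are below) =====
def Claim_equal_sanitize_username_py : Prop := ∀ (username : String), Dom_sanitize_username_py username → Spec_sanitize_username_py username (sanitize_username_py username)

-- ===== LEMMAS AND PROOFS =====

-- replace.go with a single-character pattern is a flatMap (fuel ≥ length suffices)
theorem pv_go_single (c : Char) (rep : List Char) :
    ∀ (l : List Char) (fuel : Nat) (acc : List Char), l.length ≤ fuel →
      PySem.Chars.replace.go [c] rep fuel l acc
        = acc.reverse ++ l.flatMap (fun x => if x = c then rep else [x]) := by
  intro l
  induction l with
  | nil =>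
    intro fuel acc h
    cases fuel <;> simp [PySem.Chars.replace.go]
  | cons x t ih =>
    intro fuel acc h
    cases fuel with
    | zero => simp at h
    | succ n =>
      rw [PySem.Chars.replace.go]
      by_cases hx : x = c
      · subst hx
        rw [if_pos (by simp [List.isPrefixOf])]
        simp only [List.length_cons, List.length_nil, Nat.zero_add, List.drop_succ_cons,
          List.drop_zero]
        rw [ih n _ (by simpa using h)]
        simp
      · have hpre : [c].isPrefixOf (x :: t) = false := by
          simp [List.isPrefixOf]; exact fun h' => hx h'.symm
        rw [hpre, if_neg (by trivial), ih n _ (by simpa using h)]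
        simp [hx]

-- Python's str.replace with a single-character pattern, as a per-character flatMap
theorem pv_replace_single (cs : List Char) (c : Char) (rep : List Char) :
    PySem.Chars.replace cs [c] rep = cs.flatMap (fun x => if x = c then rep else [x]) := by
  rw [PySem.Chars.replace]
  simp [pv_go_single c rep cs cs.length [] le_rfl]

-- the 13 single-char passes of A, fused (via flatMap_flatMap), agree with B's table pointwise
theorem pv_fused_eq_table (x : Char) :
    List.flatMap (fun y => List.flatMap (fun y => List.flatMap (fun y => List.flatMap (fun y => List.flatMap (fun y => List.flatMap (fun y => List.flatMap (fun y => List.flatMap (fun y => List.flatMap (fun y => List.flatMap (fun y => List.flatMap (fun y => List.flatMap (fun y => if y = ' ' then "\\20".toList else [y]) (if y = '\uFFFF' then "".toList else [y])) (if y = '\uFFFE' then "".toList else [y])) (if y = '\u007F' then "".toList else [y])) (if y = '@' then "\\40".toList else [y])) (if y = '>' then "\\3e".toList else [y])) (if y = '<' then "\\3c".toList else [y])) (if y = ':' then "\\3a".toList else [y])) (if y = '/' then "\\2f".toList else [y])) (if y = '\'' then "\\27".toList else [y])) (if y = '&' then "\\26".toList else [y])) (if y = '"' then "\\22".toList else [y]))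 (if x = '\\' then "\\5c".toList else [x]) = pvEscTable x := by
  by_cases h1 : x = '\\'; · subst h1; decide
  by_cases h2 : x = '"'; · subst h2; decide
  by_cases h3 : x = '&'; · subst h3; decide
  by_cases h4 : x = '\''; · subst h4; decide
  by_cases h5 : x = '/'; · subst h5; decide
  by_cases h6 : x = ':'; · subst h6; decide
  by_cases h7 : x = '<'; · subst h7; decide
  by_cases h8 : x = '>'; · subst h8; decide
  by_cases h9 : x = '@'; · subst h9; decide
  by_cases h10 : x = '\u007F'; · subst h10; decide
  by_cases h11 : x = '\uFFFE'; · subst h11; decide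
  by_cases h12 : x = '\uFFFF'; · subst h12; decide
  by_cases h13 : x = ' '; · subst h13; decide
  simp [pvEscTable, h1, h2, h3, h4, h5, h6, h7, h8, h9, h10, h11, h12, h13]

-- ===== VERDICT (by name: the statement is the Claim_ definition above) =====
theorem sanitize_username_py_spec : Claim_equal_sanitize_username_py := by
  intro username _
  unfold Spec_sanitize_username_py sanitize_username_py sanitize_username_py_alt pvReplaceListA
  simp only [List.foldl_cons, List.foldl_nil]
  simp only [PySem.Str.replace, String.toList_ofList]
  refine congrArg String.ofList ?_
  rw [show ("\\" : String).toList = ['\\'] from by decide,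
    show ("\"" : String).toList = ['"'] from by decide,
    show ("&" : String).toList = ['&'] from by decide,
    show ("'" : String).toList = ['\''] from by decide,
    show ("/" : String).toList = ['/'] from by decide,
    show (":" : String).toList = [':'] from by decide,
    show ("<" : String).toList = ['<'] from by decide,
    show (">" : String).toList = ['>'] from by decide,
    show ("@" : String).toList = ['@'] from by decide,
    show ("\u007F" : String).toList = ['\u007F'] from by decide,
    show ("\uFFFE" : String).toList = ['\uFFFE'] from by decide,
    show ("\uFFFF" : String).toList = ['\uFFFF'] from by decide,
    show (" " : String).toList = [' '] from by decide]
  simp only [pv_replace_single, List.flatMap_assoc]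
  exact List.flatMap_congr (fun x _ => pv_fused_eq_table x)
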